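-- pv_equiv track=rewrite | github.com/peterhadda/ai_job_platform | src/match_baseline.py | explain_match
-- ===== SOURCE A (Python) =====
-- from typing import Any, Dict, List, Iterable, Tuple
--
-- def _top_keywords(tokens: List[str], limit: int = 10) -> List[str]:
--     freq: Dict[str, int] = {}
--     for t in tokens:
--         freq[t] = freq.get(t, 0) + 1
--     # Sort by frequency desc, then alphabetically for stable output
--     return [k for k, _ in sorted(freq.items(), key=lambda x: (-x[1], x[0]))[:limit]]
--
-- def explain_match(resume_tokens: List[str], job_tokens: List[str]) -> Dict[str, List[str]]:
--     """
--     returns: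
--       matched_keywords (top 10)
--       missing_keywords (top 10)
--     """
--     resume_set = set(resume_tokens)
--     job_set = set(job_tokens)
--
--     matched = list(job_set.intersection(resume_set))
--     missing = list(job_set.difference(resume_set))
--
--     # Rank matched/missing using frequency in the job tokens
--     job_freq_rank = _top_keywords(job_tokens, limit=10_000)  # ranked list
--     job_rank_index = {kw: i for i, kw in enumerate(job_freq_rank)}
--
--     matched_sorted = sorted(matched, key=lambda kw: job_rank_index.get(kw, 10**9))[:10]
--     missing_sorted = sorted(missing, key=lambda kw: job_rank_index.get(kw, 10**9))[:10]
--
--     return {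
--         "matched_keywords": matched_sorted,
--         "missing_keywords": missing_sorted,
--     }
-- ===== SOURCE B (Python) =====
-- def explain_match(resume_tokens, job_tokens):
--     # One frequency dict, one global ranking, one partitioning pass.
--     freq = {}
--     for t in job_tokens:
--         freq[t] = freq.get(t, 0) + 1
--     ranked = sorted(freq, key=lambda k: (-freq[k], k))
--     resume_set = set(resume_tokens)
--     matched, missing = [], []
--     for t in ranked:
--         if t in resume_set:
--             if len(matched) < 10:
--                 matched.append(t)
--         else:
--             if len(missing) < 10:
--                 missing.append(t)
--     return {"matched_keywords": matched, "missing_keywords": missing}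
-- ===== Notes on version B (the rewrite author's own statement) =====
-- stated objective: simpler
-- what changed: B drops A's 10000-entry rank table (enumerate + index dict + two keyed sorts of set-intersection/difference lists) and instead sorts the distinct job tokens once by (freq desc, token asc), then partitions that ranked list into matched/missing in one capped pass; Pre_ excludes inputs with more than 10000 distinct job tokens, where A's order among keywords cut off by its rank truncation is nondeterministic (hash-seeded) set-iteration order while B orders them deterministically.
import Mathlib
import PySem

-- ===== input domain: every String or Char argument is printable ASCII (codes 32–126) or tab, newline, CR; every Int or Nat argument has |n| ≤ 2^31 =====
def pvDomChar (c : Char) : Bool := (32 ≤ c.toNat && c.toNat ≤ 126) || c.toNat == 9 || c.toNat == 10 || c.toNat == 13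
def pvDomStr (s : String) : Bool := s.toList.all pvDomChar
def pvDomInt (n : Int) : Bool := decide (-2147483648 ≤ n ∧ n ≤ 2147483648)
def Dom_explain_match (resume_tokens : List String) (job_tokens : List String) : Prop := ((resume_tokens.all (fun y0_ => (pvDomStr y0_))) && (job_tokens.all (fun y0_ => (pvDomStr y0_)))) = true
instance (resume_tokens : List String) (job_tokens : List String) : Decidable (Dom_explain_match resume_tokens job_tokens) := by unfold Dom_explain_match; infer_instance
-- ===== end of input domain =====

-- B replaces A's 10000-entry rank table and two keyed sorts by one global (freq desc, token asc) sort
-- and one capped partitioning pass (objective: simpler).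

-- ===== PORT A =====
-- _top_keywords(tokens, limit): frequency dict, sort items by (-count, key), slice, keep keys
def pyTopKeywords (tokens : List String) (limit : Int) : List String :=
  let freq : PySem.Dict String Int :=
    tokens.foldl (fun d t => d.insert t (d.getD t 0 + 1)) PySem.Dict.empty
  (PySem.List.slice
    (PySem.List.sorted2 freq.items (fun x => -x.2) (fun x => x.1)) none (some limit)).map
    (fun p => p.1)

-- NOTE on sets: 'list(job_set.intersection(resume_set))' / 'list(job_set.difference(resume_set))'
-- are ported in the Set's first-occurrence order; under Pre_ every element carries a distinct rank
-- key, so the subsequent sorted(...) does not depend on that order.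
def explain_match (resume_tokens : List String) (job_tokens : List String) : List (String × List String) :=
  let resume_set : PySem.Set String := PySem.Set.ofList resume_tokens
  let job_set : PySem.Set String := PySem.Set.ofList job_tokens
  let matched := PySem.Set.inter job_set resume_set
  let missing := PySem.Set.diff job_set resume_set
  let job_freq_rank := pyTopKeywords job_tokens 10000
  let job_rank_index : PySem.Dict String Int :=
    (PySem.List.enumerate job_freq_rank).foldl (fun d p => d.insert p.2 p.1) PySem.Dict.empty
  let matched_sorted := PySem.List.slice
    (PySem.List.sorted matched (fun kw => job_rank_index.getD kw 1000000000)) none (some 10)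
  let missing_sorted := PySem.List.slice
    (PySem.List.sorted missing (fun kw => job_rank_index.getD kw 1000000000)) none (some 10)
  [("matched_keywords", matched_sorted), ("missing_keywords", missing_sorted)]

-- ===== PORT B =====
def explain_match_alt (resume_tokens : List String) (job_tokens : List String) : List (String × List String) :=
  let freq : PySem.Dict String Int :=
    job_tokens.foldl (fun d t => d.insert t (d.getD t 0 + 1)) PySem.Dict.empty
  let ranked := PySem.List.sorted2 freq.keys (fun k => -(freq.getD k 0)) (fun k => k)
  let resume_set : PySem.Set String := PySem.Set.ofList resume_tokens
  let pair := ranked.foldl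
    (fun (acc : List String × List String) t =>
      if PySem.Set.contains resume_set t then
        if acc.1.length < 10 then (acc.1 ++ [t], acc.2) else acc
      else
        if acc.2.length < 10 then (acc.1, acc.2 ++ [t]) else acc)
    ([], [])
  [("matched_keywords", pair.1), ("missing_keywords", pair.2)]

-- ===== PRECONDITION & SPEC =====
-- Pre_ excludes inputs with more than 10000 distinct job tokens, where A's order among the keywords
-- cut off by its 10000-entry rank truncation is CPython's nondeterministic (hash-seeded) set
-- iteration order; B orders them deterministically by (freq desc, token asc).
def Pre_explain_match (resume_tokens : List String) (job_tokens : List String) : Prop :=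
  (PySem.List.dedup job_tokens).length ≤ 10000
instance (resume_tokens : List String) (job_tokens : List String) : Decidable (Pre_explain_match resume_tokens job_tokens) := by unfold Pre_explain_match; infer_instance

def pvWitness_explain_match : List String × List String := (["a", "c"], ["b", "a", "b"])

def Spec_explain_match (resume_tokens : List String) (job_tokens : List String) (out : List (String × List String)) : Prop := out = explain_match_alt resume_tokens job_tokens
instance (resume_tokens : List String) (job_tokens : List String) (out : List (String × List String)) : Decidable (Spec_explain_match resume_tokens job_tokens out) := by unfold Spec_explain_match; infer_instance

-- ===== CLAIM (what is proved, stated in full; the proofs are below) =====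
def Claim_equal_explain_match : Prop := ∀ (resume_tokens : List String) (job_tokens : List String), Dom_explain_match resume_tokens job_tokens → Pre_explain_match resume_tokens job_tokens → Spec_explain_match resume_tokens job_tokens (explain_match resume_tokens job_tokens)

-- ===== LEMMAS AND PROOFS =====

-- insertBy commutes with map when the comparison factors through f
theorem pv_insertBy_map {α β : Type} (f : β → α) (bf : α → α → Bool) (x : β) (l : List β) :
    PySem.List.insertBy bf (f x) (l.map f)
      = (PySem.List.insertBy (fun a b => bf (f a) (f b)) x l).map f := by
  induction l with
  | nil => simp [PySem.List.insertBy]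
  | cons y ys ih =>
      by_cases h : bf (f x) (f y)
      · simp [PySem.List.insertBy, h]
      · simp [PySem.List.insertBy, h, ih]

theorem pv_foldl_insertBy_map {α β : Type} (f : β → α) (bf : α → α → Bool)
    (xs : List β) (acc : List β) :
    (xs.map f).foldl (fun a x => PySem.List.insertBy bf x a) (acc.map f)
      = (xs.foldl (fun a x => PySem.List.insertBy (fun p q => bf (f p) (f q)) x a) acc).map f := by
  induction xs generalizing acc with
  | nil => simp
  | cons x xs ih =>
      simp only [List.map_cons, List.foldl_cons]
      rw [pv_insertBy_map, ih]

-- sorted(xs.map f, key=(k1,k2)) = (sorted(xs, key=(k1∘f,k2∘f))).map f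
theorem pv_sorted2_map {α β κ₁ κ₂ : Type} [LT κ₁] [DecidableLT κ₁] [LT κ₂] [DecidableLT κ₂]
    (f : β → α) (xs : List β) (k1 : α → κ₁) (k2 : α → κ₂) :
    PySem.List.sorted2 (xs.map f) k1 k2
      = (PySem.List.sorted2 xs (fun b => k1 (f b)) (fun b => k2 (f b))).map f := by
  show (xs.map f).foldl (fun a x => PySem.List.insertBy _ x a) [] = _
  rw [show ([] : List α) = ([] : List β).map f from rfl, pv_foldl_insertBy_map]
  rfl

-- the B-side loop: two independently capped filters of the ranked list
theorem pv_foldl_two_caps {α : Type} (p : α → Bool) (l : List α) (a b : List α) :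
    l.foldl
      (fun (acc : List α × List α) t =>
        if p t then
          if acc.1.length < 10 then (acc.1 ++ [t], acc.2) else acc
        else
          if acc.2.length < 10 then (acc.1, acc.2 ++ [t]) else acc)
      (a, b)
      = (a ++ (l.filter p).take (10 - a.length),
         b ++ (l.filter (fun t => !p t)).take (10 - b.length)) := by
  induction l generalizing a b with
  | nil => simp
  | cons t l ih =>
      by_cases hp : p t
      · by_cases ha : a.length < 10
        · simp only [List.foldl_cons, hp, if_true, ha, ih, List.filter_cons]
          rw [show 10 - a.length = (10 - (a ++ [t]).length) + 1 by simp; omega]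
          simp [List.take_succ_cons]
        · simp only [List.foldl_cons, hp, if_true, ha, if_false, ih, List.filter_cons]
          rw [show 10 - a.length = 0 by omega]
          simp
      · by_cases hb : b.length < 10
        · simp only [List.foldl_cons, hp, if_false, Bool.false_eq_true, hb, if_true, ih,
            List.filter_cons]
          rw [show 10 - b.length = (10 - (b ++ [t]).length) + 1 by simp; omega]
          simp [List.take_succ_cons, hp]
        · simp only [List.foldl_cons, hp, if_false, Bool.false_eq_true, hb, ih,
            List.filter_cons]
          rw [show 10 - b.length = 0 by omega]
          simp [hp]

theorem explain_match_spec : Claim_equal_explain_match := by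
  intro r j _ hpre
  unfold Spec_explain_match explain_match explain_match_alt
  dsimp only
  -- shared objects
  set freq : PySem.Dict String Int :=
    j.foldl (fun d t => d.insert t (d.getD t 0 + 1)) PySem.Dict.empty with hfreq
  set R := PySem.List.sorted2 freq.keys (fun k => -(freq.getD k 0)) (fun k => k) with hR
  have hkeys : freq.keys = PySem.Set.ofList j := by
    rw [hfreq, PySem.Dict.keys_foldl_insert]
    simp [PySem.Set.update_nil_left]
  have hnodk : freq.keys.Nodup := by rw [hkeys]; exact PySem.Set.nodup_ofList j
  have hRperm : R.Perm freq.keys := PySem.List.sorted2_perm _ _ _ _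
  have hRnodup : R.Nodup := hRperm.nodup_iff.mpr hnodk
  have hRlen : R.length ≤ 10000 := by
    have := hpre
    simp only [Pre_explain_match, PySem.List.dedup_eq_ofList] at this
    rw [hRperm.length_eq, hkeys]; exact this
  -- A's ranked list equals B's ranked list
  have hrank : pyTopKeywords j 10000 = R := by
    unfold pyTopKeywords
    dsimp only
    rw [← hfreq, PySem.Dict.items_eq_map_keys freq hnodk 0,
      pv_sorted2_map (fun k => (k, freq.getD k 0)) freq.keys (fun x => -x.2) (fun x => x.1),
      PySem.List.slice_to _ (by norm_num)]
    rw [List.take_of_length_le (by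
        simp only [List.length_map]
        rw [(PySem.List.sorted2_perm freq.keys _ _ false).length_eq]
        have := hRperm.length_eq ▸ hRlen
        omega)]
    simp only [List.map_map, Function.comp_def]
    simpa using hR.symm
  rw [hrank]
  set idx : PySem.Dict String Int :=
    (PySem.List.enumerate R).foldl (fun d p => d.insert p.2 p.1) PySem.Dict.empty with hidxd
  have hitems : idx.items = (PySem.List.enumerate R).map (fun p => (p.2, p.1)) := by
    rw [hidxd, PySem.Dict.items_foldl_insert_fresh (PySem.List.enumerate R)
      (fun p => p.2) (fun p => p.1) PySem.Dict.empty
      (fun a _ => PySem.Dict.contains_empty _)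
      (by rw [PySem.List.map_snd_enumerate]; exact hRnodup)]
    simp [PySem.Dict.empty]
  have hnodki : idx.keys.Nodup := by
    simp only [PySem.Dict.keys, hitems, List.map_map]
    simpa [Function.comp_def, PySem.List.map_snd_enumerate] using hRnodup
  have hgetd : ∀ (i : Nat) (h : i < R.length), idx.getD R[i] 1000000000 = (i : Int) := by
    intro i h
    have hmem : ((R[i] : String), (i : Int)) ∈ idx.items := by
      rw [hitems]
      refine List.mem_map.mpr ⟨((i : Int), R[i]), ?_, rfl⟩
      exact (PySem.List.mem_enumerate_iff _ _ _).mpr ⟨i, h, by simp⟩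
    exact PySem.Dict.getD_of_mem_items idx hmem hnodki _
  have hpairR : R.Pairwise (fun a b => idx.getD a 1000000000 < idx.getD b 1000000000) := by
    rw [List.pairwise_iff_getElem]
    intro a b ha hb hab
    rw [hgetd a ha, hgetd b hb]
    exact_mod_cast hab
  -- A's two sorts name the filtered ranked list
  have hsortA : ∀ (p : String → Bool),
      PySem.List.sorted (List.filter p (PySem.Set.ofList j))
        (fun kw => idx.getD kw 1000000000) = R.filter p := by
    intro p
    refine PySem.List.sorted_eq_of_perm_of_pairwise_lt _ _ _ ?_ ?_
    · exact (hRperm.trans (by rw [hkeys])).filter p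
    · exact hpairR.filter p
  -- B's loop is the two capped filters
  rw [pv_foldl_two_caps (fun t => PySem.Set.contains (PySem.Set.ofList r) t) R [] []]
  simp only [PySem.Set.inter, PySem.Set.diff,
    hsortA (fun x => PySem.Set.contains (PySem.Set.ofList r) x),
    hsortA (fun x => !PySem.Set.contains (PySem.Set.ofList r) x),
    PySem.List.slice_to _ (by norm_num : (0:Int) ≤ 10)]
  simp
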